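-- pv_equiv track=rewrite | github.com/AleksanderKuznetsov/survivor | test26_white_walkers.py | white_walkers
-- ===== SOURCE A (Python) =====
-- def white_walkers(village: str) -> bool:
--     """
--     :param village: incoming string.
--     :return: are there walkers.
--     """
--     hodok = 0
--     human1 = 0  # previous number of people.
--     human2 = 0  # current number of people.
--     flag = False
--     for line in village:
--         if line == "=":
--             hodok += 1
--             continue
--
--         if line.isnumeric():
--             human1 = human2
--             human2 = int(line)
--
--         if line.isnumeric() and human2 + human1 == 10 and hodok == 3:
--             hodok = 0
--             flag = True
--             continue
--
--         if line.isnumeric() and human2 + human1 != 10: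
--             hodok = 0
--
--         if line.isnumeric() and human2 + human1 == 10 and hodok != 3:
--             return False
--
--     if not flag:
--         return False
--
--     return True
-- ===== SOURCE B (Python) =====
-- def white_walkers(village: str) -> bool:
--     """
--     :param village: incoming string.
--     :return: are there walkers.
--     """
--     # Pass 1: tokenize into (value, bridges-before-this-number) pairs.
--     tokens = []
--     bridges = 0
--     for ch in village:
--         if ch == "=":
--             bridges += 1
--         elif ch.isnumeric():
--             tokens.append((int(ch), bridges))
--             bridges = 0
--     # Pass 2: check adjacent pairs.
--     flag = False
--     for (prev_v, _), (cur_v, cur_b) in zip(tokens, tokens[1:]):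
--         if prev_v + cur_v == 10:
--             if cur_b == 3:
--                 flag = True
--             else:
--                 return False
--     return flag
-- ===== Notes on version B (the rewrite author's own statement) =====
-- stated objective: alternative
-- what changed: Replaces A's single stateful character loop (hodok/human1/human2 registers with four guarded branches re-testing isnumeric) by a two-pass decomposition: first tokenize the string into (digit value, preceding '=' count) pairs, then scan adjacent token pairs for sum 10 with/without exactly 3 bridges.
import Mathlib
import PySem

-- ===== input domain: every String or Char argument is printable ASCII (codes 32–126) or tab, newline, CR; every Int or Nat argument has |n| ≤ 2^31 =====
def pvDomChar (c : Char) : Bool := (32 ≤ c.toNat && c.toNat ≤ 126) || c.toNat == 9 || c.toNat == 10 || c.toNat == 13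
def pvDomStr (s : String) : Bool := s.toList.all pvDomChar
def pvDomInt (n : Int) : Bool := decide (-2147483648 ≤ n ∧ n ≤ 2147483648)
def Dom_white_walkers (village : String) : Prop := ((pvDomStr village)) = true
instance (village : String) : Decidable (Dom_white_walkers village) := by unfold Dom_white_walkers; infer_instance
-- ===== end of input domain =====

-- B replaces A's single stateful loop by a tokenize-then-scan-adjacent-pairs decomposition (alternative, same cost).


-- ===== PORT A =====
-- str.isnumeric: on the printable-ASCII domain exactly the digits '0'..'9' (= PySem.Chars.isdigit)
-- int(line) for a single digit char: exact on that domain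
def pvDigitVal (c : Char) : Int := (c.toNat : Int) - 48

-- the for-loop of A, with early return encoded by returning the final Bool directly
def white_walkers_loop : List Char → Int → Int → Int → Bool → Bool
  | [], _, _, _, flag => flag
  | c :: rest, hodok, human1, human2, flag =>
    if c = '=' then
      white_walkers_loop rest (hodok + 1) human1 human2 flag
    else if PySem.Chars.isdigit c then
      -- human1 = human2; human2 = int(line)
      let h1 := human2
      let h2 := pvDigitVal c
      if h2 + h1 = 10 ∧ hodok = 3 then
        white_walkers_loop rest 0 h1 h2 true
      else if h2 + h1 ≠ 10 then
        white_walkers_loop rest 0 h1 h2 flag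
      else if h2 + h1 = 10 ∧ hodok ≠ 3 then
        false
      else
        white_walkers_loop rest hodok h1 h2 flag
    else
      white_walkers_loop rest hodok human1 human2 flag

def white_walkers (village : String) : Bool :=
  white_walkers_loop village.toList 0 0 0 false

-- ===== PORT B =====
-- pass 1 of B: build list of (value, '='-count since previous digit)
def pvTokenize : List Char → Int → List (Int × Int)
  | [], _ => []
  | c :: rest, bridges =>
    if c = '=' then pvTokenize rest (bridges + 1)
    else if PySem.Chars.isdigit c then (pvDigitVal c, bridges) :: pvTokenize rest 0
    else pvTokenize rest bridges

-- pass 2 of B: zip(tokens, tokens[1:]) scan with early return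
def pvPairScan : List (Int × Int) → Bool → Bool
  | [], flag => flag
  | [_], flag => flag
  | (pv, _) :: (cv, cb) :: rest, flag =>
    if pv + cv = 10 then
      if cb = 3 then pvPairScan ((cv, cb) :: rest) true else false
    else pvPairScan ((cv, cb) :: rest) flag

def white_walkers_alt (village : String) : Bool :=
  pvPairScan (pvTokenize village.toList 0) false

-- ===== PRECONDITION & SPEC =====
def Spec_white_walkers (village : String) (out : Bool) : Prop := out = white_walkers_alt village
instance (village : String) (out : Bool) : Decidable (Spec_white_walkers village out) := by unfold Spec_white_walkers; infer_instance

-- ===== CLAIM (what is proved, stated in full; the proofs are below) =====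
def Claim_equal_white_walkers : Prop := ∀ (village : String), Dom_white_walkers village → Spec_white_walkers village (white_walkers village)

-- ===== LEMMAS AND PROOFS =====

-- pairScan ignores the bridge count of its first token
theorem pvPairScan_head (p : Int) (b b' : Int) (ts : List (Int × Int)) (flag : Bool) :
    pvPairScan ((p, b) :: ts) flag = pvPairScan ((p, b') :: ts) flag := by
  cases ts with
  | nil => rfl
  | cons t rest => cases t; simp [pvPairScan]

-- values produced by tokenize are single digits
theorem pvTokenize_val_lt (cs : List Char) (b : Int) (t : Int × Int)
    (h : t ∈ pvTokenize cs b) : 0 ≤ t.1 ∧ t.1 ≤ 9 := by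
  induction cs generalizing b with
  | nil => simp [pvTokenize] at h
  | cons c rest ih =>
    simp only [pvTokenize] at h
    split at h
    · exact ih _ h
    · split at h
      · rename_i hd
        rcases List.mem_cons.mp h with h | h
        · subst h
          simp only [PySem.Chars.isdigit, Bool.and_eq_true, decide_eq_true_eq,
            Char.le_def] at hd
          obtain ⟨hl, hr⟩ := hd
          rw [UInt32.le_iff_toNat_le] at hl hr
          have e0 : ('0').val.toNat = 48 := rfl
          have e9 : ('9').val.toNat = 57 := rfl
          simp only [pvDigitVal, Char.toNat]
          omega
        · exact ih _ h
      · exact ih _ h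

-- one-step unfolding of pvPairScan on two or more tokens
theorem pvPairScan_cons₂ (pv pb cv cb : Int) (rest : List (Int × Int)) (flag : Bool) :
    pvPairScan ((pv, pb) :: (cv, cb) :: rest) flag
      = if pv + cv = 10 then
          (if cb = 3 then pvPairScan ((cv, cb) :: rest) true else false)
        else pvPairScan ((cv, cb) :: rest) flag := by
  simp [pvPairScan]

-- main invariant: A's loop from state (hodok, h1, h2, flag) equals B's pair scan
-- over the tokens of the rest, with (h2, _) prepended as the previous token
theorem loop_eq_scan (cs : List Char) (hodok h1 h2 : Int) (flag : Bool) :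
    white_walkers_loop cs hodok h1 h2 flag
      = pvPairScan ((h2, 0) :: pvTokenize cs hodok) flag := by
  induction cs generalizing hodok h1 h2 flag with
  | nil => simp [white_walkers_loop, pvTokenize, pvPairScan]
  | cons c rest ih =>
    simp only [white_walkers_loop, pvTokenize]
    split
    · exact ih _ h1 h2 flag
    · split
      · -- digit
        rw [pvPairScan_cons₂]
        split
        · rename_i hcond
          rw [if_pos (by omega), if_pos hcond.2, ih 0 h2 (pvDigitVal c) true]
          exact pvPairScan_head _ _ _ _ _
        · split
          · rename_i hne
            rw [if_neg (by omega), ih 0 h2 (pvDigitVal c) flag]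
            exact pvPairScan_head _ _ _ _ _
          · split
            · rename_i h1c h2c h3c
              rw [if_pos (by omega), if_neg h3c.2]
            · rename_i h1c h2c h3c
              exact absurd (by omega : (pvDigitVal c) + h2 = 10 ∧ hodok = 3) h1c
      · -- other char: skipped by both
        rw [ih hodok h1 h2 flag]

-- ===== VERDICT (by name: the statement is the Claim_ definition above) =====
theorem white_walkers_spec : Claim_equal_white_walkers := by
  intro village _
  unfold Spec_white_walkers white_walkers white_walkers_alt
  rw [loop_eq_scan]
  cases h : pvTokenize village.toList 0 with
  | nil => rfl
  | cons t ts =>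
    cases t with
    | mk v b =>
      have hv := pvTokenize_val_lt village.toList 0 (v, b) (by rw [h]; exact List.mem_cons_self ..)
      simp only [pvPairScan]
      rw [if_neg (by simp at hv; omega)]
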